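-- pv_equiv track=rewrite | github.com/maetelson/persona-pipeline | src/analysis/deck_ready_denominator_eligibility.py | _explicit_noise_count
-- ===== SOURCE A (Python) =====
-- from typing import Any
--
-- def _explicit_noise_count(category_counts: dict[str, Any]) -> int:
--     """Return combined count across explicit denominator-ineligible noise categories."""
--     explicit_categories = {
--         "technical_support_debug_noise",
--         "source_specific_support_noise",
--         "setup_auth_permission_noise",
--         "api_sdk_debug_noise",
--         "server_deploy_config_noise",
--         "syntax_formula_debug_noise",
--         "vendor_announcement_or_feature_request_only",
--         "career_training_certification_noise",
--     }
--     return sum(int(category_counts.get(category, 0) or 0) for category in explicit_categories)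
-- ===== SOURCE B (Python) =====
-- def _explicit_noise_count(category_counts):
--     """Return combined count across explicit denominator-ineligible noise categories."""
--     explicit_categories = {
--         "technical_support_debug_noise",
--         "source_specific_support_noise",
--         "setup_auth_permission_noise",
--         "api_sdk_debug_noise",
--         "server_deploy_config_noise",
--         "syntax_formula_debug_noise",
--         "vendor_announcement_or_feature_request_only",
--         "career_training_certification_noise",
--     }
--     total = 0
--     for key, value in category_counts.items():
--         if key in explicit_categories:
--             total += int(value or 0)
--     return total
-- ===== Notes on version B (the rewrite author's own statement) =====
-- stated objective: alternative
-- what changed: B makes one pass over category_counts.items() accumulating values whose key is in the explicit set, instead of A's generator that does one dict .get lookup per fixed category and sums; the loop is driven by the input dict rather than by the 8 category names.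
import Mathlib
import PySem

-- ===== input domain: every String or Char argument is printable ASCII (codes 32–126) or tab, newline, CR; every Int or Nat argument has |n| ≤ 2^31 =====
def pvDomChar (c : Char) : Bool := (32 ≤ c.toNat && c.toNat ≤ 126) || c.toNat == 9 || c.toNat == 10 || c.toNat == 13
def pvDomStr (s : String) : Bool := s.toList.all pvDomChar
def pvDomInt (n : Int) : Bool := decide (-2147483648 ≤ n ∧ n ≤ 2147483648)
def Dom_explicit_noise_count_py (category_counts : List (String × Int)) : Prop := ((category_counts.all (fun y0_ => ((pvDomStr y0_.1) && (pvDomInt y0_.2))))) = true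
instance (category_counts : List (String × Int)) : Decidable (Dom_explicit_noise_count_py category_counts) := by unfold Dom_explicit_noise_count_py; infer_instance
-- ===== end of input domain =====

-- B iterates once over the dict's items, accumulating values whose key lies in the explicit
-- set, instead of A's per-category .get lookups (alternative decomposition, not faster).

-- ===== PORT A =====
-- the fixed explicit-category set (Python set literal; sum over it is order-independent)
def pvCategories : List String :=
  [ "technical_support_debug_noise",
    "source_specific_support_noise",
    "setup_auth_permission_noise",
    "api_sdk_debug_noise",
    "server_deploy_config_noise",
    "syntax_formula_debug_noise",
    "vendor_announcement_or_feature_request_only",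
    "career_training_certification_noise" ]

-- category_counts.get(category, 0) on the association list (first match, default 0)
def pvGetA (xs : List (String × Int)) (c : String) : Int :=
  match xs with
  | [] => 0
  | (k, v) :: t => if k = c then v else pvGetA t c

def explicit_noise_count_py (category_counts : List (String × Int)) : Int :=
  -- sum(int(category_counts.get(category, 0) or 0) for category in explicit_categories)
  -- 'v or 0' on an int is 'if v = 0 then 0 else v'; int() on an int is the identity
  (pvCategories.map (fun c =>
    let v := pvGetA category_counts c
    if v = 0 then 0 else v)).sum

-- ===== PORT B =====
def pvCategoriesAlt : List String :=
  [ "technical_support_debug_noise",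
    "source_specific_support_noise",
    "setup_auth_permission_noise",
    "api_sdk_debug_noise",
    "server_deploy_config_noise",
    "syntax_formula_debug_noise",
    "vendor_announcement_or_feature_request_only",
    "career_training_certification_noise" ]

def explicit_noise_count_py_alt (category_counts : List (String × Int)) : Int :=
  -- total = 0; for key, value in items: if key in explicit: total += int(value or 0)
  category_counts.foldl
    (fun total p =>
      if p.1 ∈ pvCategoriesAlt then total + (if p.2 = 0 then 0 else p.2) else total)
    0

-- ===== PRECONDITION & SPEC =====
-- Pre_ requires distinct keys: the Python argument is a dict, whose keys are necessarily
-- distinct, so duplicate-key association lists represent no Python input.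
def Pre_explicit_noise_count_py (category_counts : List (String × Int)) : Prop :=
  (category_counts.map Prod.fst).Nodup
instance (category_counts : List (String × Int)) : Decidable (Pre_explicit_noise_count_py category_counts) := by unfold Pre_explicit_noise_count_py; infer_instance

def pvWitness_explicit_noise_count_py : (List (String × Int)) :=
  [("api_sdk_debug_noise", 3), ("other_category", 7)]

def Spec_explicit_noise_count_py (category_counts : List (String × Int)) (out : Int) : Prop := out = explicit_noise_count_py_alt category_counts
instance (category_counts : List (String × Int)) (out : Int) : Decidable (Spec_explicit_noise_count_py category_counts out) := by unfold Spec_explicit_noise_count_py; infer_instance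

-- ===== CLAIM (what is proved, stated in full; the proofs are below) =====
def Claim_equal_explicit_noise_count_py : Prop := ∀ (category_counts : List (String × Int)), Dom_explicit_noise_count_py category_counts → Pre_explicit_noise_count_py category_counts → Spec_explicit_noise_count_py category_counts (explicit_noise_count_py category_counts)

-- ===== LEMMAS AND PROOFS =====

-- 'if v = 0 then 0 else v' is the identity on Int
theorem pvNorm_id (v : Int) : (if v = 0 then 0 else v) = v := by
  split <;> omega

-- with nodup keys, summing the single matching value over the list equals first-match lookup
theorem pvSum_single (xs : List (String × Int)) (c : String)
    (h : (xs.map Prod.fst).Nodup) :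
    (xs.map (fun p => if p.1 = c then p.2 else 0)).sum = pvGetA xs c := by
  induction xs with
  | nil => simp [pvGetA]
  | cons hd t ih =>
    obtain ⟨k, v⟩ := hd
    simp only [List.map_cons, List.nodup_cons] at h
    simp only [List.map_cons, List.sum_cons, pvGetA]
    by_cases hk : k = c
    · subst hk
      have hz : (t.map (fun p => if p.1 = k then p.2 else (0:Int))).sum = 0 := by
        have hc : ∀ p ∈ t, (if p.1 = k then p.2 else (0:Int)) = (fun _ => (0:Int)) p := by
          intro p hp
          rw [if_neg]
          intro hpk
          exact h.1 (hpk ▸ List.mem_map_of_mem hp)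
        rw [List.map_congr_left hc]
        simp
      simp [hz]
    · simp only [if_neg hk, zero_add]
      exact ih h.2

-- main bridge: sum of lookups over a nodup category list = one filtered pass over the items
theorem pvBridge (cats : List String) (xs : List (String × Int))
    (hcats : cats.Nodup) (hxs : (xs.map Prod.fst).Nodup) :
    (cats.map (fun c => pvGetA xs c)).sum
      = (xs.map (fun p => if p.1 ∈ cats then p.2 else 0)).sum := by
  induction cats with
  | nil => simp
  | cons c cs ih =>
    simp only [List.nodup_cons] at hcats
    have hsplit : ∀ p ∈ xs,
        (if p.1 ∈ c :: cs then p.2 else (0:Int))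
          = (if p.1 = c then p.2 else 0) + (if p.1 ∈ cs then p.2 else 0) := by
      intro p _
      by_cases h1 : p.1 = c
      · subst h1
        simp [hcats.1]
      · simp [h1, List.mem_cons]
    rw [List.map_congr_left hsplit, PySem.List.sum_map_add_int,
        pvSum_single xs c hxs, ← ih hcats.2]
    simp

-- ===== VERDICT (by name: the statement is the Claim_ definition above) =====
theorem explicit_noise_count_py_spec : Claim_equal_explicit_noise_count_py := by
  intro cc _ hpre
  unfold Spec_explicit_noise_count_py explicit_noise_count_py explicit_noise_count_py_alt
  have hstep : (fun (t : Int) (p : String × Int) =>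
      if p.1 ∈ pvCategoriesAlt then t + (if p.2 = 0 then 0 else p.2) else t)
      = fun t p => t + (if p.1 ∈ pvCategoriesAlt then p.2 else 0) := by
    funext t p
    rw [pvNorm_id]
    split <;> omega
  rw [hstep, PySem.List.foldl_add, zero_add]
  simp only [pvNorm_id]
  have hAB : pvCategories = pvCategoriesAlt := rfl
  rw [hAB]
  exact pvBridge pvCategoriesAlt cc (by decide) hpre
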